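-- pv_equiv track=rewrite | github.com/reginaib/Programming | Series_06/single-nucleotide polymorphism.py | SNPs
-- ===== SOURCE A (Python) =====
-- def SNP(seq1, seq2):
--
--     """
--     >>> SNP('AAGCCTA', 'AAGCTTA')
--     (4, 'C', 'T')
--     >>> SNP('AAGCCTAA', 'AAGCTTA')
--     >>> SNP('AAGCTTA', 'AAGCTTA')
--     >>> SNP('AAGCCCA', 'AAGCTTA')
--     """
--
--     # check whether sequences have equal length
--     if len(seq1) != len(seq2):
--         return None
--
--     # check whether sequences differ at exactly one position
--     SNP = None
--     for index, (base1, base2) in enumerate(zip(seq1.upper(), seq2.upper())):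
--         if base1 != base2:
--             if SNP is None:
--                 # first position where both sequences differ
--                 SNP = (index, base1, base2)
--             else:
--                 # second position where both sequences differ
--                 return None
--
--     # return position where both sequences differ (if unique and existing)
--     return SNP
--
-- def SNPs(genome, read):
--
--     """
--     >>> SNPs('AGCTGATAAGCCTAAGCGCT', 'AAGCTTA')
--     [11]
--     >>> SNPs('ATCGTAAGCCTAAGGCTACGCTTAGAGATA', 'AAGCTTA')
--     [9, 18]
--     >>> SNPs('AAGCCTAAGCCTA', 'AAGCTTA')
--     [4, 10]
--     """
--
--     # sliding window traversal of genome in order to find SNPs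
--     SNPs = []
--     m, n = len(genome), len(read)
--     for i in range(m - n + 1):
--         window = genome[i:i + n]
--         snp = SNP(window, read)
--         if snp is not None:
--             # translate position in read to position in genome
--             SNPs.append(i + snp[0])
--
--     # sort list of SNPs
--     SNPs.sort()
--
--     # return sorted list of SNPs
--     return SNPs
-- ===== SOURCE B (Python) =====
-- def _prefix_len(x, y):
--     k = 0
--     while k < len(x) and k < len(y) and x[k] == y[k]:
--         k += 1
--     return k
--
-- def SNPs(genome, read):
--     g, r = genome.upper(), read.upper()
--     n = len(read)
--     out = []
--     for i in range(len(genome) - n + 1):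
--         w = g[i:i + n]
--         p = _prefix_len(w, r)
--         if p < n:
--             q = _prefix_len(w[::-1], r[::-1])
--             if p + q == n - 1:
--                 out.append(i + p)
--     out.sort()
--     return out
-- ===== Notes on version B (the rewrite author's own statement) =====
-- stated objective: alternative
-- what changed: Per window, instead of a stateful scan over enumerate(zip(...)) tracking the first mismatch and bailing on a second, B computes the longest common prefix and the longest common suffix (prefix of the reversals) of window and read and accepts iff they sum to len(read)-1, the mismatch position being the prefix length.
import Mathlib
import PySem

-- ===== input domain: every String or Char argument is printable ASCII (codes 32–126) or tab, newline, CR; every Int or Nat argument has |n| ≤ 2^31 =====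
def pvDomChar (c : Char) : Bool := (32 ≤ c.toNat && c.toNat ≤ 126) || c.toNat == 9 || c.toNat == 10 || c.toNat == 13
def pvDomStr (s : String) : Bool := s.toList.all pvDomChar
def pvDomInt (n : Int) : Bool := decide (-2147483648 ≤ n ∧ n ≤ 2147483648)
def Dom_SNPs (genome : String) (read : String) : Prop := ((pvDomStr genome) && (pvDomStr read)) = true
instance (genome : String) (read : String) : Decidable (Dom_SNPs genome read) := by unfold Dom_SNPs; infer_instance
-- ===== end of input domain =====

-- B replaces A's stateful first/second-mismatch scan per window by a longest-common-prefix /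
-- longest-common-suffix check (accept iff they sum to len(read)-1); alternative decomposition, same cost.

-- ===== PORT A =====
-- the for-loop of SNP over enumerate(zip(...)); acc is the Python variable SNP (None = not yet found);
-- a second mismatch is Python's early 'return None'
def snpLoop : List (Int × Char × Char) → Option (Int × Char × Char) → Option (Int × Char × Char)
  | [], acc => acc
  | (i, b1, b2) :: rest, acc =>
    if b1 ≠ b2 then
      match acc with
      | none => snpLoop rest (some (i, b1, b2))
      | some _ => none
    else snpLoop rest acc

def SNP (seq1 : String) (seq2 : String) : Option (Int × Char × Char) :=
  if PySem.Str.len seq1 ≠ PySem.Str.len seq2 then none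
  else snpLoop (PySem.List.enumerate (List.zip (PySem.Str.upper seq1).toList (PySem.Str.upper seq2).toList) 0) none

def SNPs (genome : String) (read : String) : List Int :=
  PySem.List.sorted
    ((PySem.List.pyRange 0 (PySem.Str.len genome - PySem.Str.len read + 1) 1).foldl
      (fun acc i =>
        match SNP (PySem.Str.slice genome (some i) (some (i + PySem.Str.len read))) read with
        | some snp => acc ++ [i + snp.1]
        | none => acc) [])
    id false

-- ===== PORT B =====
-- the while-loop of _prefix_len, as structural recursion over the two char lists (same comparisons, same count)
def prefixLen : List Char → List Char → Int
  | a :: as, b :: bs => if a = b then prefixLen as bs + 1 else 0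
  | _, _ => 0

def SNPs_alt (genome : String) (read : String) : List Int :=
  PySem.List.sorted
    ((PySem.List.pyRange 0 (PySem.Str.len genome - PySem.Str.len read + 1) 1).foldl
      (fun acc i =>
        let w := PySem.List.slice (PySem.Str.upper genome).toList (some i) (some (i + PySem.Str.len read))
        let p := prefixLen w (PySem.Str.upper read).toList
        if p < PySem.Str.len read then
          -- w[::-1] is reversal (PySem.List.slice?_none_none_neg_one)
          if p + prefixLen w.reverse (PySem.Str.upper read).toList.reverse = PySem.Str.len read - 1
          then acc ++ [i + p] else acc
        else acc) [])
    id false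

-- ===== PRECONDITION & SPEC =====
def Spec_SNPs (genome : String) (read : String) (out : List Int) : Prop := out = SNPs_alt genome read
instance (genome : String) (read : String) (out : List Int) : Decidable (Spec_SNPs genome read out) := by unfold Spec_SNPs; infer_instance

-- ===== CLAIM (what is proved, stated in full; the proofs are below) =====
def Claim_equal_SNPs : Prop := ∀ (genome : String) (read : String), Dom_SNPs genome read → Spec_SNPs genome read (SNPs genome read)

-- ===== LEMMAS AND PROOFS =====

-- 0-based positions at which the two lists differ (on their common length)
def mism : List Char → List Char → List Nat
  | a :: as, b :: bs =>
    if a = b then (mism as bs).map (· + 1) else 0 :: (mism as bs).map (· + 1)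
  | _, _ => []

lemma mism_lt (w r : List Char) : ∀ j ∈ mism w r, j < w.length ∧ j < r.length := by
  induction w generalizing r with
  | nil => simp [mism]
  | cons a as ih =>
    cases r with
    | nil => simp [mism]
    | cons b bs =>
      intro j hj
      by_cases hab : a = b
      · simp only [mism, if_pos hab, List.mem_map] at hj
        obtain ⟨j', hj', rfl⟩ := hj
        have := ih bs j' hj'
        simp only [List.length_cons]; omega
      · simp only [mism, if_neg hab, List.mem_cons, List.mem_map] at hj
        rcases hj with rfl | ⟨j', hj', rfl⟩
        · simp
        · have := ih bs j' hj'
          simp only [List.length_cons]; omega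

lemma mism_pairwise (w r : List Char) : (mism w r).Pairwise (· < ·) := by
  induction w generalizing r with
  | nil => simp [mism]
  | cons a as ih =>
    cases r with
    | nil => simp [mism]
    | cons b bs =>
      by_cases hab : a = b
      · simpa [mism, hab, List.pairwise_map] using (ih bs).imp (fun h => by omega)
      · simp only [mism, if_neg hab]
        refine List.Pairwise.cons ?_ ?_
        · intro j hj
          simp only [List.mem_map] at hj
          obtain ⟨j', _, rfl⟩ := hj
          omega
        · simpa [List.pairwise_map] using (ih bs).imp (fun h => by omega)

lemma prefixLen_eq (w r : List Char) :
    prefixLen w r = ((mism w r).headD (min w.length r.length) : Int) := by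
  induction w generalizing r with
  | nil => simp [prefixLen, mism]
  | cons a as ih =>
    cases r with
    | nil => simp [prefixLen, mism]
    | cons b bs =>
      by_cases hab : a = b
      · rcases hl : mism as bs with _ | ⟨j, t⟩
        · simp [prefixLen, mism, hab, ih, hl]
        · simp [prefixLen, mism, hab, ih, hl]
      · simp [prefixLen, mism, hab]

lemma mism_append (xs ys : List Char) (a b : Char) (h : xs.length = ys.length) :
    mism (xs ++ [a]) (ys ++ [b]) = mism xs ys ++ (if a = b then [] else [xs.length]) := by
  induction xs generalizing ys with
  | nil =>
    cases ys with
    | nil => by_cases hab : a = b <;> simp [mism, hab]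
    | cons y ys' => simp at h
  | cons x xs' ih =>
    cases ys with
    | nil => simp at h
    | cons y ys' =>
      simp only [List.length_cons, Nat.add_right_cancel_iff] at h
      by_cases hxy : x = y
      · simp [mism, hxy, ih ys' h, List.map_append]
        by_cases hab : a = b <;> simp [hab]
      · simp [mism, hxy, ih ys' h, List.map_append]
        by_cases hab : a = b <;> simp [hab]

lemma mism_reverse (w r : List Char) (h : w.length = r.length) :
    mism w.reverse r.reverse = ((mism w r).map (fun j => w.length - 1 - j)).reverse := by
  induction w generalizing r with
  | nil =>
    cases r with
    | nil => simp [mism]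
    | cons b bs => simp at h
  | cons a as ih =>
    cases r with
    | nil => simp at h
    | cons b bs =>
      simp only [List.length_cons, Nat.add_right_cancel_iff] at h
      rw [List.reverse_cons, List.reverse_cons,
        mism_append as.reverse bs.reverse a b (by simp [h]), ih bs h]
      simp only [mism, List.length_reverse, List.length_cons]
      by_cases hab : a = b
      · rw [if_pos hab, if_pos hab, List.append_nil, List.map_map]
        congr 1
        apply List.map_congr_left
        intro j hj
        simp only [Function.comp_apply]
        omega
      · rw [if_neg hab, if_neg hab, List.map_cons, List.reverse_cons, List.map_map]
        congr 2
        apply List.map_congr_left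
        intro j hj
        simp only [Function.comp_apply]
        omega

lemma snpLoop_some (w r : List Char) (k : Int) (t : Int × Char × Char) :
    snpLoop (PySem.List.enumerate (w.zip r) k) (some t)
      = if mism w r = [] then some t else none := by
  induction w generalizing r k with
  | nil => simp [snpLoop, mism]
  | cons a as ih =>
    cases r with
    | nil => simp [snpLoop, mism]
    | cons b bs =>
      by_cases hab : a = b
      · rcases hl : mism as bs with _ | ⟨j, t'⟩ <;>
          simp [PySem.List.enumerate_cons, snpLoop, hab, mism, ih, hl]
      · simp [PySem.List.enumerate_cons, snpLoop, hab, mism]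

lemma snpLoop_none (w r : List Char) (k : Int) :
    (snpLoop (PySem.List.enumerate (w.zip r) k) none).map (·.1)
      = match mism w r with
        | [j] => some (k + (j : Int))
        | _ => none := by
  induction w generalizing r k with
  | nil => simp [snpLoop, mism]
  | cons a as ih =>
    cases r with
    | nil => simp [snpLoop, mism]
    | cons b bs =>
      by_cases hab : a = b
      · have := ih bs (k + 1)
        rcases hl : mism as bs with _ | ⟨j, _ | ⟨j2, t2⟩⟩ <;>
          · rw [hl] at this
            simp only [mism, if_pos hab, hl]
            simp [PySem.List.enumerate_cons, snpLoop, hab, this]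
            try push_cast
            try ring
      · rw [show mism (a :: as) (b :: bs) = 0 :: (mism as bs).map (· + 1) by
          simp [mism, hab]]
        simp only [List.zip_cons_cons, PySem.List.enumerate_cons]
        rw [show snpLoop ((k, a, b) :: PySem.List.enumerate (as.zip bs) (k + 1)) none
            = snpLoop (PySem.List.enumerate (as.zip bs) (k + 1)) (some (k, a, b)) by
          simp [snpLoop, hab]]
        rw [snpLoop_some as bs (k + 1) (k, a, b)]
        rcases hl : mism as bs with _ | ⟨j, t'⟩ <;> simp

-- per-window: A's SNP-scan contribution equals B's prefix/suffix test
lemma win_eq (w r : List Char) (h : w.length = r.length) (acc : List Int) (i : Int) :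
    (match snpLoop (PySem.List.enumerate (w.zip r) 0) none with
      | some snp => acc ++ [i + snp.1]
      | none => acc)
    = (if prefixLen w r < (r.length : Int) then
        if prefixLen w r + prefixLen w.reverse r.reverse = (r.length : Int) - 1
        then acc ++ [i + prefixLen w r] else acc
      else acc) := by
  have hA := snpLoop_none w r 0
  rcases hm : mism w r with _ | ⟨j, _ | ⟨j2, rest2⟩⟩
  · -- identical: A finds nothing, B's prefix is full length
    rw [hm] at hA
    have hs : snpLoop (PySem.List.enumerate (w.zip r) 0) none = none := by
      rcases hsn : snpLoop (PySem.List.enumerate (w.zip r) 0) none with _ | s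
      · rfl
      · rw [hsn] at hA; simp at hA
    rw [hs, prefixLen_eq, hm]
    simp [h]
  · -- unique mismatch at j
    rw [hm] at hA
    have hj := (mism_lt w r j (by rw [hm]; simp)).1
    rcases hsn : snpLoop (PySem.List.enumerate (w.zip r) 0) none with _ | s
    · rw [hsn] at hA; simp at hA
    · rw [hsn] at hA
      simp only [Option.map_some, Option.some.injEq, zero_add] at hA
      have hrev : mism w.reverse r.reverse = [w.length - 1 - j] := by
        rw [mism_reverse w r h, hm]; simp
      rw [prefixLen_eq w r, prefixLen_eq w.reverse r.reverse, hm, hrev]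
      simp only [List.headD_cons]
      rw [if_pos (by omega), if_pos (by omega)]
      simp [hA]
  · -- at least two mismatches
    rw [hm] at hA
    have hs : snpLoop (PySem.List.enumerate (w.zip r) 0) none = none := by
      rcases hsn : snpLoop (PySem.List.enumerate (w.zip r) 0) none with _ | s
      · rfl
      · rw [hsn] at hA; simp at hA
    have hpw := mism_pairwise w r
    rw [hm] at hpw
    rcases hL : (j2 :: rest2).getLast? with _ | L
    · simp [List.getLast?_eq_none_iff] at hL
    · have hLmem : L ∈ j2 :: rest2 := List.mem_of_getLast? hL
      have hjL : j < L := (List.pairwise_cons.mp hpw).1 L hLmem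
      have hLlt := (mism_lt w r L (by rw [hm]; exact List.mem_cons_of_mem _ hLmem)).1
      have hj := (mism_lt w r j (by rw [hm]; simp)).1
      have hq : prefixLen w.reverse r.reverse = ((w.length - 1 - L : Nat) : Int) := by
        rw [prefixLen_eq, mism_reverse w r h, hm]
        rw [List.headD_eq_head?_getD, List.head?_reverse, List.getLast?_map]
        rw [List.getLast?_cons_cons, hL]
        simp
      rw [hs, prefixLen_eq w r, hm, List.headD_cons, hq]
      rw [if_pos (by omega), if_neg (by omega)]

theorem SNPs_spec : Claim_equal_SNPs := by
  intro genome read _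
  unfold Spec_SNPs SNPs SNPs_alt
  refine congrArg (fun l => PySem.List.sorted l id false) ?_
  apply PySem.List.foldl_congr_mem
  intro acc i hi
  rw [PySem.List.mem_pyRange_one] at hi
  obtain ⟨k, rfl⟩ : ∃ k : Nat, i = (k : Int) := ⟨i.toNat, (Int.toNat_of_nonneg hi.1).symm⟩
  have hi2 := hi.2
  rw [PySem.Str.len_eq, PySem.Str.len_eq] at hi2
  have hkb : k + read.toList.length ≤ genome.toList.length := by omega
  dsimp only
  simp only [PySem.Str.len_eq]
  have hulen : ∀ s : String, (PySem.Str.upper s).toList = s.toList.map PySem.Chars.upperChar := by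
    intro s; rw [PySem.Str.toList_upper]; rfl
  -- A's window, as a list
  have hwin : (PySem.Str.slice genome (some (k : Int)) (some ((k : Int) + (read.toList.length : Int)))).toList
      = (genome.toList.drop k).take read.toList.length := by
    rw [PySem.Str.toList_slice, PySem.Chars.slice_eq_listSlice, PySem.List.slice_natCast_add]
  -- length of the window = length of the read: A's equal-length guard is false
  have hwl : (PySem.Str.slice genome (some (k : Int)) (some ((k : Int) + (read.toList.length : Int)))).toList.length
      = read.toList.length := by
    rw [hwin]; simp only [List.length_take, List.length_drop]; omega
  rw [SNP, if_neg (by rw [PySem.Str.len_eq, PySem.Str.len_eq, hwl]; simp)]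
  -- B's window equals the uppercased A window
  have hbw : PySem.List.slice (PySem.Str.upper genome).toList (some (k : Int))
        (some ((k : Int) + (read.toList.length : Int)))
      = (PySem.Str.upper (PySem.Str.slice genome (some (k : Int)) (some ((k : Int) + (read.toList.length : Int))))).toList := by
    rw [hulen, hulen, hwin, PySem.List.slice_natCast_add, List.map_take, List.map_drop]
  rw [hbw]
  have hrl : (PySem.Str.upper read).toList.length = read.toList.length := by
    rw [hulen]; simp
  have hlen : (PySem.Str.upper (PySem.Str.slice genome (some (k : Int)) (some ((k : Int) + (read.toList.length : Int))))).toList.length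
      = (PySem.Str.upper read).toList.length := by
    rw [hulen, hrl, List.length_map, hwl]
  have hwe := win_eq
    (PySem.Str.upper (PySem.Str.slice genome (some (k : Int)) (some ((k : Int) + (read.toList.length : Int))))).toList
    (PySem.Str.upper read).toList hlen acc (k : Int)
  rw [hrl] at hwe
  exact hwe
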